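-- pv_equiv track=rewrite | github.com/iramcastaneda/nlqueryborder | grammautils.py | split_into_parenthesis
-- ===== SOURCE A (Python) =====
-- def split_into_parenthesis(str):
--     list=[]
--     count=0
--     index=0
--     first=True
--     for i in str:
--         if(count==0):
--             list.append(i)
--             if(not first):
--                 index+=1
--             first=False
--         else:
--             list[index]+=i
--         if(i =="("):
--             count+=1
--         if(i==")"):
--             count-=1
--     return list
-- ===== SOURCE B (Python) =====
-- def _delta(c):
--     return (1 if c == "(" else 0) + (-1 if c == ")" else 0)
--
-- def split_into_parenthesis(str):
--     out = []
--     i, n = 0, len(str)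
--     while i < n:
--         d = _delta(str[i])
--         j = i + 1
--         while j < n and d != 0:
--             d += _delta(str[j])
--             j += 1
--         out.append(str[i:j])
--         i = j
--     return out
-- ===== Notes on version B (the rewrite author's own statement) =====
-- stated objective: alternative
-- what changed: A appends char-by-char to the last group inside one fold over mutable (list, count, index, first) state; B scans indices to locate each group's end (inner depth loop) and slices whole groups out of the string.
import Mathlib
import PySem

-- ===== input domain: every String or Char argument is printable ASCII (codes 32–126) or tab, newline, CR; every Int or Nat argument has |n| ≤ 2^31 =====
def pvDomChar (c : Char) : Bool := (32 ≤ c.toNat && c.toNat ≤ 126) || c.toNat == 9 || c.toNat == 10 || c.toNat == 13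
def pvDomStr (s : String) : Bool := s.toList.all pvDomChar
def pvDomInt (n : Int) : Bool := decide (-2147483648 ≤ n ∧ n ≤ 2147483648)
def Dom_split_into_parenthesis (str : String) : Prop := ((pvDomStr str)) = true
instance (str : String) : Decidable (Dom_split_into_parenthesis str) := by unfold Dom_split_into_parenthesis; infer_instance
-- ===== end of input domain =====

-- B replaces A's char-by-char append-to-last-group fold by an index scan that finds each
-- group's end and slices it out whole (objective: alternative decomposition, same cost).

-- ===== PORT A =====
-- one loop step of A's `for i in str`: state = (list, count, index, first)
def pvStepA (st : List String × Int × Nat × Bool) (c : Char) : List String × Int × Nat × Bool :=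
  let (lst, cnt, idx, first) := st
  let (lst, idx, first) :=
    if cnt = 0 then
      (lst ++ [String.singleton c], if first then idx else idx + 1, false)
    else
      (lst.modify idx (fun s => s ++ String.singleton c), idx, first)  -- list[index] += i
  let cnt := cnt + (if c = '(' then 1 else 0)
  let cnt := cnt + (if c = ')' then -1 else 0)
  (lst, cnt, idx, first)

def split_into_parenthesis (str : String) : List String :=
  (str.toList.foldl pvStepA ([], 0, 0, true)).1

-- ===== PORT B =====
def pvDelta (c : Char) : Int := (if c = '(' then 1 else 0) + (if c = ')' then -1 else 0)

-- inner `while j < n and d != 0` loop of Source B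
def pvInner (cs : List Char) (d : Int) (j : Nat) : Nat :=
  if h : j < cs.length ∧ d ≠ 0 then pvInner cs (d + pvDelta cs[j]) (j + 1) else j
termination_by cs.length - j

theorem pvInner_ge (cs : List Char) (d : Int) (j : Nat) : j ≤ pvInner cs d j := by
  induction d, j using pvInner.induct cs with
  | case1 d j h ih => rw [pvInner, dif_pos h]; omega
  | case2 d j h => rw [pvInner, dif_neg h]

-- outer `while i < n` loop of Source B; `str[i:j]` (0 ≤ i ≤ j) is exactly drop-then-take
def pvOuter (cs : List Char) (i : Nat) : List String :=
  if h : i < cs.length then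
    let j := pvInner cs (pvDelta cs[i]) (i + 1)
    String.ofList ((cs.drop i).take (j - i)) :: pvOuter cs j
  else []
termination_by cs.length - i
decreasing_by have := pvInner_ge cs (pvDelta cs[i]) (i + 1); omega

def split_into_parenthesis_alt (str : String) : List String := pvOuter str.toList 0

-- ===== PRECONDITION & SPEC =====
def Spec_split_into_parenthesis (str : String) (out : List String) : Prop := out = split_into_parenthesis_alt str
instance (str : String) (out : List String) : Decidable (Spec_split_into_parenthesis str out) := by unfold Spec_split_into_parenthesis; infer_instance

-- ===== CLAIM (what is proved, stated in full; the proofs are below) =====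
def Claim_equal_split_into_parenthesis : Prop := ∀ (str : String), Dom_split_into_parenthesis str → Spec_split_into_parenthesis str (split_into_parenthesis str)

-- ===== LEMMAS AND PROOFS =====

-- reference recursive description of the split, used only by the proofs
def pvSpanD (d : Int) : List Char → List Char × List Char
  | [] => ([], [])
  | x :: xs =>
    if d = 0 then ([], x :: xs)
    else
      let p := pvSpanD (d + pvDelta x) xs
      (x :: p.1, p.2)

theorem pvSpanD_snd_le (d : Int) (xs : List Char) : (pvSpanD d xs).2.length ≤ xs.length := by
  induction xs generalizing d with
  | nil => simp [pvSpanD]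
  | cons x xs ih =>
    simp only [pvSpanD]
    split
    · simp
    · exact le_trans (ih _) (by simp)

def pvSplitL : List Char → List String
  | [] => []
  | c :: cs =>
    let p := pvSpanD (pvDelta c) cs
    String.ofList (c :: p.1) :: pvSplitL p.2
termination_by xs => xs.length
decreasing_by have := pvSpanD_snd_le (pvDelta c) cs; simpa using Nat.lt_succ_of_le this

theorem pvSpanD_zero (xs : List Char) : pvSpanD 0 xs = ([], xs) := by
  cases xs <;> simp [pvSpanD]

theorem pv_modify_last {α : Type} (L : List α) (g : α) (f : α → α) :
    (L ++ [g]).modify L.length f = L ++ [f g] := by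
  induction L with
  | nil => simp
  | cons a L ih => simpa using ih

-- A's fold, started inside a partial group `g` at depth `d`, finishes that group with
-- pvSpanD and continues with pvSplitL
theorem pv_foldA_main (xs : List Char) : ∀ (L : List String) (g : List Char) (d : Int),
    (xs.foldl pvStepA (L ++ [String.ofList g], d, L.length, false)).1
      = L ++ [String.ofList (g ++ (pvSpanD d xs).1)] ++ pvSplitL (pvSpanD d xs).2 := by
  induction xs with
  | nil => intro L g d; simp [pvSpanD, pvSplitL]
  | cons x xs ih =>
    intro L g d
    by_cases hd : d = 0
    · subst hd
      have h1 : (pvStepA (L ++ [String.ofList g], (0 : Int), L.length, false) x)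
          = ((L ++ [String.ofList g]) ++ [String.ofList [x]], pvDelta x,
             (L ++ [String.ofList g]).length, false) := by
        simp [pvStepA, String.singleton_eq_ofList, pvDelta]
      rw [List.foldl_cons, h1, ih, pvSpanD_zero]
      conv_rhs => rw [pvSplitL]
      simp
    · have h1 : (pvStepA (L ++ [String.ofList g], d, L.length, false) x)
          = (L ++ [String.ofList (g ++ [x])], d + pvDelta x, L.length, false) := by
        simp only [pvStepA, if_neg hd]
        rw [pv_modify_last]
        simp [String.singleton_eq_ofList, String.ofList_append, pvDelta]
        ring
      rw [List.foldl_cons, h1, ih]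
      simp only [pvSpanD, if_neg hd]
      simp

theorem pvA_eq_splitL (str : String) :
    split_into_parenthesis str = pvSplitL str.toList := by
  unfold split_into_parenthesis
  cases h : str.toList with
  | nil => simp [pvSplitL]
  | cons c cs =>
    have h1 : (pvStepA ([], 0, 0, true) c)
        = (([] : List String) ++ [String.ofList [c]], pvDelta c,
           ([] : List String).length, false) := by
      simp [pvStepA, String.singleton_eq_ofList, pvDelta]
    rw [List.foldl_cons, h1, pv_foldA_main]
    conv_rhs => rw [pvSplitL]
    simp

theorem pvInner_spec (cs : List Char) : ∀ (d : Int) (i : Nat),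
    pvSpanD d (cs.drop i)
      = ((cs.drop i).take (pvInner cs d i - i), cs.drop (pvInner cs d i)) := by
  intro d i
  induction d, i using pvInner.induct cs with
  | case1 d i h ih =>
    rw [pvInner, dif_pos h]
    have hge := pvInner_ge cs (d + pvDelta cs[i]) (i + 1)
    set j := pvInner cs (d + pvDelta cs[i]) (i + 1) with hj
    have hdrop : cs.drop i = cs[i] :: cs.drop (i + 1) := List.drop_eq_getElem_cons h.1
    rw [hdrop]
    simp only [pvSpanD, if_neg h.2, ih]
    have htake : (cs[i] :: cs.drop (i + 1)).take (j - i)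
        = cs[i] :: (cs.drop (i + 1)).take (j - (i + 1)) := by
      have : j - i = (j - (i + 1)) + 1 := by omega
      rw [this, List.take_succ_cons]
    rw [htake]
  | case2 d i h =>
    rw [pvInner, dif_neg h]
    by_cases hd : d = 0
    · subst hd; rw [pvSpanD_zero]; simp
    · have : cs.length ≤ i := by
        by_contra hlt; exact h ⟨by omega, hd⟩
      rw [List.drop_eq_nil_of_le this]
      simp [pvSpanD]

theorem pvOuter_eq_splitL (cs : List Char) : ∀ (i : Nat),
    pvOuter cs i = pvSplitL (cs.drop i) := by
  intro i
  induction i using pvOuter.induct cs with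
  | case1 i h j ih =>
    rw [pvOuter, dif_pos h]
    have hge := pvInner_ge cs (pvDelta cs[i]) (i + 1)
    have hdrop : cs.drop i = cs[i] :: cs.drop (i + 1) := List.drop_eq_getElem_cons h
    rw [hdrop]
    conv_rhs => rw [pvSplitL]
    have hspec := pvInner_spec cs (pvDelta cs[i]) (i + 1)
    rw [hspec]
    show String.ofList ((cs[i] :: cs.drop (i + 1)).take (j - i)) :: pvOuter cs j
        = String.ofList (cs[i] :: (cs.drop (i + 1)).take (j - (i + 1))) :: pvSplitL (cs.drop j)
    rw [ih]
    have : j - i = (j - (i + 1)) + 1 := by omega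
    rw [this, List.take_succ_cons]
  | case2 i h =>
    rw [pvOuter, dif_neg h]
    rw [List.drop_eq_nil_of_le (by omega)]
    simp [pvSplitL]

-- ===== VERDICT (by name: the statement is the Claim_ definition above) =====
theorem split_into_parenthesis_spec : Claim_equal_split_into_parenthesis := by
  intro str _
  unfold Spec_split_into_parenthesis split_into_parenthesis_alt
  rw [pvA_eq_splitL, pvOuter_eq_splitL]
  simp
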